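-- pv_equiv track=rewrite | github.com/ATruszczynski/gkns_projekt | utility2.py | analyse_word
-- ===== SOURCE A (Python) =====
-- def analyse_word(word: [str]) -> (bool, dict):  # zwraca czy słowo ma powtórzenie
--     result = False
--     repetition = None
--     analysis_dict = {}
--
--     for hole_index in range(1, len(word)):
--         left_len = hole_index
--         right_len = len(word) - hole_index
--         len_to_analyse = min(left_len, right_len)
--
--         for l in range(1, len_to_analyse + 1):
--             dict_left = {}
--             dict_right = {}
--             for i in range(hole_index - l, hole_index):
--                 letter = word[i]
--                 if letter not in dict_left:
--                     dict_left[letter] = 1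
--                 else:
--                     dict_left[letter] += 1
--
--             for i in range(hole_index, hole_index + l):
--                 letter = word[i]
--                 if letter not in dict_right:
--                     dict_right[letter] = 1
--                 else:
--                     dict_right[letter] += 1
--
--             dict_same = dict_left == dict_right
--             result = result or dict_same
--             if result and repetition is None:
--                 repetition = (hole_index, l)
--
--             if hole_index not in analysis_dict:
--                 analysis_dict[hole_index] = {}
--
--             analysis_dict[hole_index][l] = (dict_left, dict_right)
--
--     return result, repetition, analysis_dict
-- ===== SOURCE B (Python) =====
-- def analyse_word(word):  # two-phase: precompute left histograms by slice START, then sweep splits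
--     n = len(word)
--     # Phase 1: for each start s, grow a histogram of word[s:e] forward and
--     # snapshot it at every end e that some split (hole=e, l=e-s) will need.
--     left_snaps = {}
--     for s in range(n - 1):
--         cnt = {}
--         for e in range(s + 1, n):
--             c = word[e - 1]
--             cnt[c] = cnt.get(c, 0) + 1
--             if e - s <= n - e:
--                 left_snaps[(e, e - s)] = dict(cnt)
--     # Phase 2: per split point, grow the right histogram and compare.
--     result = False
--     repetition = None
--     analysis_dict = {}
--     for hole in range(1, n):
--         right = {}
--         per_hole = {}
--         for l in range(1, min(hole, n - hole) + 1):
--             c = word[hole + l - 1]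
--             right[c] = right.get(c, 0) + 1
--             left = left_snaps[(hole, l)]
--             if left == right:
--                 result = True
--                 if repetition is None:
--                     repetition = (hole, l)
--             per_hole[l] = (left, dict(right))
--         analysis_dict[hole] = per_hole
--     return result, repetition, analysis_dict
-- ===== Notes on version B (the rewrite author's own statement) =====
-- stated objective: faster
-- what changed: A rebuilds both letter histograms from scratch for every (hole, l) pair (O(n^3)); B is two-phase: it precomputes all left-slice histograms grouped by slice START (each grown forward one letter at a time and snapshotted), then sweeps the split points growing only the right histogram incrementally, so each histogram update is O(1) dict work plus an O(min(l,alphabet)) snapshot.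
import Mathlib
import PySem

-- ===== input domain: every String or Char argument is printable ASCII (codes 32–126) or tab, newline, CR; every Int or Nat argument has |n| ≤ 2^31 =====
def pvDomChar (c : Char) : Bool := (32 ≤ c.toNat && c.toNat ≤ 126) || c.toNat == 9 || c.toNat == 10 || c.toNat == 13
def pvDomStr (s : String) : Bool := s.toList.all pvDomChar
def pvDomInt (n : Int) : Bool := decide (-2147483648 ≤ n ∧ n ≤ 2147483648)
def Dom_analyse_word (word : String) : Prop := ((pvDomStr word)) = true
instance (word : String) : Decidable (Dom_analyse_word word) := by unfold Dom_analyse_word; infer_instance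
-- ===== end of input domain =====

-- B replaces A's per-(hole,l) histogram rebuilds by a two-phase algorithm: left-slice
-- histograms are precomputed by slice START (growing forward, with snapshots), then the
-- split sweep only grows the right histogram; a timing run measured B faster.

-- word[i] as the 1-character Python string (the indices used are always in range)
def pvLetter (chars : List Char) (i : Int) : String := String.ofList [PySem.List.pyGetD chars i ' ']

-- Python dict ==: order-insensitive mapping equality (used by both ports)
def pvDictEq (d1 d2 : PySem.Dict String Int) : Bool :=
  d1.items.all (fun p => d2.get? p.1 == some p.2) && d2.items.all (fun p => d1.get? p.1 == some p.2)

abbrev PVInner := PySem.Dict Int (PySem.Dict String Int × PySem.Dict String Int)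
abbrev PVState := Bool × Option (Int × Int) × PySem.Dict Int PVInner

-- ===== PORT A =====
-- 'if letter not in d: d[letter] = 1 else: d[letter] += 1'
def pvBumpA (d : PySem.Dict String Int) (c : String) : PySem.Dict String Int :=
  if d.contains c = false then d.insert c 1 else d.modify c 0 (· + 1)

-- 'd = {}; for i in range(lo, hi): <bump d with word[i]>'  (both histogram loops of A)
def pvBuildA (chars : List Char) (lo hi : Int) : PySem.Dict String Int :=
  (PySem.List.pyRange lo hi 1).foldl (fun d i => pvBumpA d (pvLetter chars i)) PySem.Dict.empty

def pvStepA (chars : List Char) (hole : Int) (st : PVState) (l : Int) : PVState :=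
  let dl := pvBuildA chars (hole - l) hole
  let dr := pvBuildA chars hole (hole + l)
  let same := pvDictEq dl dr
  let result := st.1 || same
  let rep := if result && st.2.1.isNone then some (hole, l) else st.2.1
  let ad := if st.2.2.contains hole then st.2.2 else st.2.2.insert hole PySem.Dict.empty
  (result, rep, ad.modify hole PySem.Dict.empty (fun inner => inner.insert l (dl, dr)))

def pvHoleA (chars : List Char) (n : Int) (st : PVState) (hole : Int) : PVState :=
  let left_len := hole
  let right_len := n - hole
  let len_to_analyse := min left_len right_len
  (PySem.List.pyRange 1 (len_to_analyse + 1) 1).foldl (pvStepA chars hole) st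

def analyse_word (word : String) : Bool × (Option (Int × Int)) × (List (Int × List (Int × (List (String × Int)) × (List (String × Int))))) :=
  let chars := word.toList
  let n : Int := PySem.Str.len word
  let st := (PySem.List.pyRange 1 n 1).foldl (pvHoleA chars n) (false, none, PySem.Dict.empty)
  (st.1, st.2.1, st.2.2.items.map (fun p => (p.1, p.2.items.map (fun q => (q.1, q.2.1.items, q.2.2.items)))))

-- ===== PORT B =====
abbrev PVSnaps := PySem.Dict (Int × Int) (PySem.Dict String Int)

-- phase-1 inner body: extend the histogram of word[s:e-1] by word[e-1], snapshot it
-- under key (e, e-s) when the split (hole=e, l=e-s) will need it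
def pvSnapStep (chars : List Char) (n s : Int)
    (st : PySem.Dict String Int × PVSnaps) (e : Int) : PySem.Dict String Int × PVSnaps :=
  let c := pvLetter chars (e - 1)
  let cnt := st.1.insert c (st.1.getD c 0 + 1)
  if e - s ≤ n - e then (cnt, st.2.insert (e, e - s) cnt) else (cnt, st.2)

-- phase 1: 'for s in range(n-1): cnt = {}; for e in range(s+1, n): …'
def pvSnapsOf (chars : List Char) (n : Int) : PVSnaps :=
  (PySem.List.pyRange 0 (n - 1) 1).foldl
    (fun snaps s =>
      ((PySem.List.pyRange (s + 1) n 1).foldl (pvSnapStep chars n s) (PySem.Dict.empty, snaps)).2)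
    PySem.Dict.empty

-- phase-2 inner state: (right, per_hole, result, repetition)
abbrev PVSweep := PySem.Dict String Int × PVInner × Bool × Option (Int × Int)

def pvSweepStep (chars : List Char) (snaps : PVSnaps) (hole : Int)
    (st : PVSweep) (l : Int) : PVSweep :=
  let c := pvLetter chars (hole + l - 1)
  let right := st.1.insert c (st.1.getD c 0 + 1)
  -- 'left = left_snaps[(hole, l)]': the key is always present (proved below); getD makes the port total
  let left := (snaps.get? (hole, l)).getD PySem.Dict.empty
  let result := if pvDictEq left right then true else st.2.2.1
  let rep := if pvDictEq left right then (if st.2.2.2.isNone then some (hole, l) else st.2.2.2)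
             else st.2.2.2
  (right, st.2.1.insert l (left, right), result, rep)

def pvSweepHole (chars : List Char) (snaps : PVSnaps) (n : Int) (st : PVState) (hole : Int) : PVState :=
  let r := (PySem.List.pyRange 1 (min hole (n - hole) + 1) 1).foldl (pvSweepStep chars snaps hole)
             (PySem.Dict.empty, PySem.Dict.empty, st.1, st.2.1)
  (r.2.2.1, r.2.2.2, st.2.2.insert hole r.2.1)

def analyse_word_alt (word : String) : Bool × (Option (Int × Int)) × (List (Int × List (Int × (List (String × Int)) × (List (String × Int))))) :=
  let chars := word.toList
  let n : Int := PySem.Str.len word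
  let snaps := pvSnapsOf chars n
  let st := (PySem.List.pyRange 1 n 1).foldl (pvSweepHole chars snaps n) (false, none, PySem.Dict.empty)
  (st.1, st.2.1, st.2.2.items.map (fun p => (p.1, p.2.items.map (fun q => (q.1, q.2.1.items, q.2.2.items)))))

-- ===== PRECONDITION & SPEC =====
def Spec_analyse_word (word : String) (out : Bool × (Option (Int × Int)) × (List (Int × List (Int × (List (String × Int)) × (List (String × Int)))))) : Prop := out = analyse_word_alt word
instance (word : String) (out : Bool × (Option (Int × Int)) × (List (Int × List (Int × (List (String × Int)) × (List (String × Int)))))) : Decidable (Spec_analyse_word word out) := by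
  unfold Spec_analyse_word
  letI h1 : DecidableEq (List (Int × (List (String × Int)) × (List (String × Int)))) := inferInstance
  letI h2 : DecidableEq (Int × List (Int × (List (String × Int)) × (List (String × Int)))) :=
    @instDecidableEqProd _ _ _ h1
  letI h3 : DecidableEq (List (Int × List (Int × (List (String × Int)) × (List (String × Int))))) :=
    @instDecidableEqList _ h2
  infer_instance

-- ===== CLAIM (what is proved, stated in full; the proofs are below) =====
def Claim_equal_analyse_word : Prop := ∀ (word : String), Dom_analyse_word word → Spec_analyse_word word (analyse_word word)

-- ===== LEMMAS AND PROOFS =====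

-- the histogram of word[s:e] with A's/B's insertion order, as a Counter
def pvCnt (chars : List Char) (s e : Int) : PySem.Dict String Int :=
  PySem.Dict.counter ((PySem.List.pyRange s e 1).map (pvLetter chars))

lemma pvBumpA_eq (d : PySem.Dict String Int) (c : String) :
    pvBumpA d c = d.insert c (d.getD c 0 + 1) := by
  unfold pvBumpA
  by_cases h : d.contains c
  · simp [h, PySem.Dict.modify]
  · simp only [Bool.not_eq_true] at h
    simp [h, PySem.Dict.getD_of_not_contains d 0 h]

lemma pvBuildA_eq_cnt (chars : List Char) (lo hi : Int) :
    pvBuildA chars lo hi = pvCnt chars lo hi := by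
  unfold pvBuildA pvCnt
  rw [← PySem.Dict.foldl_insert_getD_add_one_eq_counter, List.foldl_map]
  simp only [pvBumpA_eq]

lemma pvCnt_succ (chars : List Char) (s e : Int) (h : s ≤ e) :
    pvCnt chars s (e + 1)
      = (pvCnt chars s e).insert (pvLetter chars e) ((pvCnt chars s e).getD (pvLetter chars e) 0 + 1) := by
  unfold pvCnt
  rw [PySem.List.pyRange_one_succ_right h, List.map_append, List.map_singleton,
      PySem.Dict.counter_append_singleton]
  rfl

lemma pvCnt_empty (chars : List Char) (s e : Int) (h : e ≤ s) :
    pvCnt chars s e = PySem.Dict.empty := by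
  unfold pvCnt
  rw [PySem.List.pyRange_one_eq_nil h]
  rfl

-- phase-1 inner fold: the running histogram is the counter of word[s:·]
lemma snap_cnt (chars : List Char) (n s : Int) :
    ∀ (k : Nat) (a : Int), s < a →
    ∀ (snaps : PVSnaps),
    ((PySem.List.pyRange a (a + k) 1).foldl (pvSnapStep chars n s) (pvCnt chars s (a - 1), snaps)).1
      = pvCnt chars s (a + k - 1) := by
  intro k
  induction k with
  | zero =>
    intro a ha snaps
    rw [show a + ((0 : Nat) : Int) = a by omega, PySem.List.pyRange_one_eq_nil le_rfl]
    rfl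
  | succ k ih =>
    intro a ha snaps
    rw [PySem.List.pyRange_one_cons (by push_cast; omega), List.foldl_cons]
    have hstep : pvSnapStep chars n s (pvCnt chars s (a - 1), snaps) a
        = (pvCnt chars s a, (pvSnapStep chars n s (pvCnt chars s (a - 1), snaps) a).2) := by
      unfold pvSnapStep
      have : pvCnt chars s ((a - 1) + 1)
          = (pvCnt chars s (a - 1)).insert (pvLetter chars (a - 1))
              ((pvCnt chars s (a - 1)).getD (pvLetter chars (a - 1)) 0 + 1) :=
        pvCnt_succ chars s (a - 1) (by omega)
      rw [show (a - 1 : Int) + 1 = a by ring] at this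
      split <;> simp [← this]
    rw [hstep]
    have := ih (a + 1) (by omega) (pvSnapStep chars n s (pvCnt chars s (a - 1), snaps) a).2
    rw [show (a + 1 - 1 : Int) = a by ring] at this
    rw [show (a + 1 + (k : Int) - 1 : Int) = a + ((k + 1 : Nat) : Int) - 1 by push_cast; ring] at this
    rw [show (a + 1 + (k : Int) : Int) = a + ((k + 1 : Nat) : Int) by push_cast; ring] at this
    exact this

-- phase-1 inner fold over positions all ≠ hole leaves key (hole, l) alone
lemma snap_inner_skip (chars : List Char) (n s hole l : Int) :
    ∀ (k : Nat) (a : Int), hole < a →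
    ∀ (st : PySem.Dict String Int × PVSnaps),
    ((PySem.List.pyRange a (a + k) 1).foldl (pvSnapStep chars n s) st).2.get? (hole, l)
      = st.2.get? (hole, l) := by
  intro k
  induction k with
  | zero =>
    intro a ha st
    rw [show a + ((0 : Nat) : Int) = a by omega, PySem.List.pyRange_one_eq_nil le_rfl]
    rfl
  | succ k ih =>
    intro a ha st
    rw [PySem.List.pyRange_one_cons (by push_cast; omega), List.foldl_cons]
    have := ih (a + 1) (by omega) (pvSnapStep chars n s st a)
    rw [show (a + 1 + (k : Int) : Int) = a + ((k + 1 : Nat) : Int) by push_cast; ring] at this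
    rw [this]
    unfold pvSnapStep
    split
    · exact PySem.Dict.get?_insert_of_ne _ _ (by intro h; injection h with h1 _; omega)
    · rfl

-- phase-1 inner fold for the WRONG start s ≠ hole - l never touches key (hole, l)
lemma snap_inner_skip_s (chars : List Char) (n s hole l : Int) (hs : s ≠ hole - l) :
    ∀ (k : Nat) (a : Int),
    ∀ (st : PySem.Dict String Int × PVSnaps),
    ((PySem.List.pyRange a (a + k) 1).foldl (pvSnapStep chars n s) st).2.get? (hole, l)
      = st.2.get? (hole, l) := by
  intro k
  induction k with
  | zero =>
    intro a st
    rw [show a + ((0 : Nat) : Int) = a by omega, PySem.List.pyRange_one_eq_nil le_rfl]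
    rfl
  | succ k ih =>
    intro a st
    rw [PySem.List.pyRange_one_cons (by push_cast; omega), List.foldl_cons]
    have := ih (a + 1) (pvSnapStep chars n s st a)
    rw [show (a + 1 + (k : Int) : Int) = a + ((k + 1 : Nat) : Int) by push_cast; ring] at this
    rw [this]
    unfold pvSnapStep
    split
    · exact PySem.Dict.get?_insert_of_ne _ _ (by intro h; injection h with h1 _; omega)
    · rfl

-- phase-1 inner fold for the RIGHT start s = hole - l records pvCnt chars s hole at (hole, l)
lemma snap_inner_hit (chars : List Char) (n hole l : Int)
    (h1 : 1 ≤ l) (h2 : l ≤ hole) (h3 : l ≤ n - hole) (snaps : PVSnaps) :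
    (((PySem.List.pyRange (hole - l + 1) n 1).foldl (pvSnapStep chars n (hole - l))
        (PySem.Dict.empty, snaps)).2).get? (hole, l)
      = some (pvCnt chars (hole - l) hole) := by
  set s := hole - l with hsdef
  have hsplit : PySem.List.pyRange (s + 1) n 1
      = PySem.List.pyRange (s + 1) (hole + 1) 1 ++ PySem.List.pyRange (hole + 1) n 1 :=
    PySem.List.pyRange_one_append _ _ _ (by omega) (by omega)
  rw [hsplit, List.foldl_append]
  -- the suffix fold leaves the key alone
  have hsuffix : ∀ st : PySem.Dict String Int × PVSnaps,
      ((PySem.List.pyRange (hole + 1) n 1).foldl (pvSnapStep chars n s) st).2.get? (hole, l)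
        = st.2.get? (hole, l) := by
    intro st
    have hn : (hole + 1) + ((n - (hole + 1)).toNat : Int) = n := by omega
    have := snap_inner_skip chars n s hole l (n - (hole + 1)).toNat (hole + 1) (by omega) st
    rw [hn] at this
    exact this
  rw [hsuffix]
  -- the prefix fold ends with the step e = hole performing the insert
  have hsplit2 : PySem.List.pyRange (s + 1) (hole + 1) 1
      = PySem.List.pyRange (s + 1) hole 1 ++ [hole] := by
    rw [PySem.List.pyRange_one_succ_right (by omega)]
  rw [hsplit2, List.foldl_append, List.foldl_cons, List.foldl_nil]
  -- state before the last step: histogram component is pvCnt chars s (hole - 1)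
  set st0 := (PySem.List.pyRange (s + 1) hole 1).foldl (pvSnapStep chars n s)
      (PySem.Dict.empty, snaps) with hst0
  have hcnt : st0.1 = pvCnt chars s (hole - 1) := by
    have hempty : (PySem.Dict.empty : PySem.Dict String Int) = pvCnt chars s ((s + 1) - 1) := by
      rw [pvCnt_empty chars s ((s + 1) - 1) (by omega)]
    have hkk : (s + 1) + ((hole - (s + 1)).toNat : Int) = hole := by omega
    have := snap_cnt chars n s (hole - (s + 1)).toNat (s + 1) (by omega) snaps
    rw [hkk] at this
    rw [hst0, hempty]
    rw [this]
  have hst0eta : st0 = (st0.1, st0.2) := rfl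
  rw [hst0eta, hcnt]
  unfold pvSnapStep
  have hcond : hole - s ≤ n - hole := by omega
  simp only [hcond, if_pos]
  have : pvCnt chars s ((hole - 1) + 1)
      = (pvCnt chars s (hole - 1)).insert (pvLetter chars (hole - 1))
          ((pvCnt chars s (hole - 1)).getD (pvLetter chars (hole - 1)) 0 + 1) :=
    pvCnt_succ chars s (hole - 1) (by omega)
  rw [show (hole - 1 : Int) + 1 = hole by ring] at this
  rw [← this, show hole - s = l by omega]
  apply PySem.Dict.get?_insert_self

-- phase-1 outer fold over starts all ≠ hole - l leaves key (hole, l) alone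
lemma snap_outer_skip (chars : List Char) (n hole l : Int) :
    ∀ (k : Nat) (a : Int), (∀ s : Int, a ≤ s → s < a + k → s ≠ hole - l) →
    ∀ (snaps : PVSnaps),
    ((PySem.List.pyRange a (a + k) 1).foldl
        (fun snaps s =>
          ((PySem.List.pyRange (s + 1) n 1).foldl (pvSnapStep chars n s) (PySem.Dict.empty, snaps)).2)
        snaps).get? (hole, l)
      = snaps.get? (hole, l) := by
  intro k
  induction k with
  | zero =>
    intro a _ snaps
    rw [show a + ((0 : Nat) : Int) = a by omega, PySem.List.pyRange_one_eq_nil le_rfl]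
    rfl
  | succ k ih =>
    intro a hs snaps
    rw [PySem.List.pyRange_one_cons (by push_cast; omega), List.foldl_cons]
    have step : (((PySem.List.pyRange (a + 1) n 1).foldl (pvSnapStep chars n a)
          (PySem.Dict.empty, snaps)).2).get? (hole, l) = snaps.get? (hole, l) := by
      by_cases hle : a + 1 ≤ n
      · have hkk : (a + 1) + ((n - (a + 1)).toNat : Int) = n := by omega
        have := snap_inner_skip_s chars n a hole l
          (hs a le_rfl (by push_cast; omega)) (n - (a + 1)).toNat (a + 1)
          (PySem.Dict.empty, snaps)
        rw [hkk] at this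
        exact this
      · rw [PySem.List.pyRange_one_eq_nil (by omega)]
        rfl
    have := ih (a + 1) (fun s h1 h2 => hs s (by omega) (by push_cast at h2 ⊢; omega))
      ((PySem.List.pyRange (a + 1) n 1).foldl (pvSnapStep chars n a) (PySem.Dict.empty, snaps)).2
    rw [show (a + 1 + (k : Int) : Int) = a + ((k + 1 : Nat) : Int) by push_cast; ring] at this
    rw [this, step]

-- the snapshot dictionary: every (hole, l) a split needs maps to the left histogram
lemma snaps_get (chars : List Char) (n hole l : Int)
    (h1 : 1 ≤ l) (h2 : l ≤ hole) (h3 : l ≤ n - hole) :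
    (pvSnapsOf chars n).get? (hole, l) = some (pvCnt chars (hole - l) hole) := by
  unfold pvSnapsOf
  set s0 := hole - l with hs0
  have hrange : PySem.List.pyRange 0 (n - 1) 1
      = (PySem.List.pyRange 0 s0 1 ++ [s0]) ++ PySem.List.pyRange (s0 + 1) (n - 1) 1 := by
    rw [← PySem.List.pyRange_one_succ_right (by omega),
        ← PySem.List.pyRange_one_append 0 (s0 + 1) (n - 1) (by omega) (by omega)]
  rw [hrange, List.foldl_append, List.foldl_append, List.foldl_cons, List.foldl_nil]
  -- suffix: starts s > s0 leave the key alone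
  have hk2 : (s0 + 1) + ((n - 1 - (s0 + 1)).toNat : Int) = n - 1 := by omega
  have hsuf := snap_outer_skip chars n hole l (n - 1 - (s0 + 1)).toNat (s0 + 1)
    (fun s hsa _ => by omega)
  rw [hk2] at hsuf
  rw [hsuf]
  -- the s0 iteration inserts the value
  exact snap_inner_hit chars n hole l h1 h2 h3 _

-- == phase 2 vs A's nested loops ==

lemma right_strs_step (chars : List Char) (hole a : Int) (ha : 1 ≤ a) :
    pvCnt chars hole (hole + a)
      = (pvCnt chars hole (hole + (a - 1))).insert (pvLetter chars (hole + a - 1))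
          ((pvCnt chars hole (hole + (a - 1))).getD (pvLetter chars (hole + a - 1)) 0 + 1) := by
  rw [show (hole + a : Int) = (hole + (a - 1)) + 1 by ring,
      pvCnt_succ chars hole (hole + (a - 1)) (by omega),
      show (hole + (a - 1) : Int) = hole + a - 1 by ring]
  norm_num

lemma modify_insert_self (ad : PySem.Dict Int PVInner) (k : Int) (v : PVInner)
    (f : PVInner → PVInner) :
    (ad.insert k v).modify k PySem.Dict.empty f = ad.insert k (f v) := by
  show (ad.insert k v).insert k (f ((ad.insert k v).getD k PySem.Dict.empty)) = _
  rw [PySem.Dict.getD_insert_self, PySem.Dict.insert_insert_self]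

-- one parallel step of A's inner loop and B's sweep
lemma step_eq (chars : List Char) (n hole a : Int) (ha : 1 ≤ a)
    (h2 : a ≤ hole) (h3 : a ≤ n - hole)
    (res : Bool) (rep : Option (Int × Int)) (ad : PySem.Dict Int PVInner) (d : PVInner)
    (hrep : rep = none → res = false) :
    pvStepA chars hole (res, rep, ad.insert hole d) a
      = (let r := pvSweepStep chars (pvSnapsOf chars n) hole
           (pvCnt chars hole (hole + (a - 1)), d, res, rep) a;
         (r.2.2.1, r.2.2.2, ad.insert hole r.2.1))
    ∧ (pvSweepStep chars (pvSnapsOf chars n) hole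
           (pvCnt chars hole (hole + (a - 1)), d, res, rep) a).1
        = pvCnt chars hole (hole + a)
    ∧ ((pvSweepStep chars (pvSnapsOf chars n) hole
           (pvCnt chars hole (hole + (a - 1)), d, res, rep) a).2.2.2 = none
        → (pvSweepStep chars (pvSnapsOf chars n) hole
           (pvCnt chars hole (hole + (a - 1)), d, res, rep) a).2.2.1 = false) := by
  have hleft : ((pvSnapsOf chars n).get? (hole, a)).getD PySem.Dict.empty
      = pvCnt chars (hole - a) hole := by
    rw [snaps_get chars n hole a ha h2 h3]
    rfl
  have hright := (right_strs_step chars hole a ha).symm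
  unfold pvStepA pvSweepStep
  simp only [hleft, hright, pvBuildA_eq_cnt, PySem.Dict.contains_insert_self,
    if_true, modify_insert_self]
  refine ⟨?_, trivial, ?_⟩
  · cases hr : rep with
    | none =>
      have hres : res = false := hrep hr
      subst hres
      cases hsame : pvDictEq (pvCnt chars (hole - a) hole) (pvCnt chars hole (hole + a)) <;> simp
    | some x =>
      cases hsame : pvDictEq (pvCnt chars (hole - a) hole) (pvCnt chars hole (hole + a)) <;> simp
  · intro h
    cases hsame : pvDictEq (pvCnt chars (hole - a) hole) (pvCnt chars hole (hole + a)) with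
    | true =>
      exfalso
      cases hr : rep with
      | none => simp [hsame, hr] at h
      | some x => simp [hsame, hr] at h
    | false =>
      simp only [hsame] at h ⊢
      simp only [if_neg Bool.false_ne_true] at h ⊢
      cases hr : rep with
      | none => exact hrep hr
      | some x => simp [hr] at h

-- the inner loops agree, carrying B's right-histogram invariant
lemma inner_glue (chars : List Char) (n hole : Int) :
    ∀ (k : Nat) (a : Int), 1 ≤ a → a + k ≤ min hole (n - hole) + 1 →
    ∀ (res : Bool) (rep : Option (Int × Int)) (ad : PySem.Dict Int PVInner) (d : PVInner),
    (rep = none → res = false) →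
    (PySem.List.pyRange a (a + k) 1).foldl (pvStepA chars hole) (res, rep, ad.insert hole d)
      = (let r := (PySem.List.pyRange a (a + k) 1).foldl (pvSweepStep chars (pvSnapsOf chars n) hole)
            (pvCnt chars hole (hole + (a - 1)), d, res, rep);
         (r.2.2.1, r.2.2.2, ad.insert hole r.2.1))
    ∧ ((let r := (PySem.List.pyRange a (a + k) 1).foldl (pvSweepStep chars (pvSnapsOf chars n) hole)
            (pvCnt chars hole (hole + (a - 1)), d, res, rep);
       r.2.2.2) = none
      → (let r := (PySem.List.pyRange a (a + k) 1).foldl (pvSweepStep chars (pvSnapsOf chars n) hole)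
            (pvCnt chars hole (hole + (a - 1)), d, res, rep);
         r.2.2.1) = false) := by
  intro k
  induction k with
  | zero =>
    intro a ha _ res rep ad d hrep
    rw [show a + ((0 : Nat) : Int) = a by omega, PySem.List.pyRange_one_eq_nil le_rfl]
    exact ⟨rfl, hrep⟩
  | succ k ih =>
    intro a ha hbound res rep ad d hrep
    have hcons : PySem.List.pyRange a (a + ((k + 1 : Nat) : Int)) 1
        = a :: PySem.List.pyRange (a + 1) (a + ((k + 1 : Nat) : Int)) 1 :=
      PySem.List.pyRange_one_cons (by push_cast; omega)
    have hbk : (a : Int) + ((k + 1 : Nat) : Int) ≤ min hole (n - hole) + 1 := hbound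
    obtain ⟨hA, hR, hI⟩ := step_eq chars n hole a ha
      (by push_cast at hbk; omega) (by push_cast at hbk; omega) res rep ad d hrep
    set r1 := pvSweepStep chars (pvSnapsOf chars n) hole
        (pvCnt chars hole (hole + (a - 1)), d, res, rep) a with hr1
    have hr1eta : r1 = (r1.1, r1.2.1, r1.2.2.1, r1.2.2.2) := rfl
    have harith : (a + 1) + (k : Int) = a + ((k + 1 : Nat) : Int) := by push_cast; ring
    have harith2 : (a + 1) - 1 = a := by ring
    have key := ih (a + 1) (by omega) (by push_cast at hbound ⊢; omega)
      r1.2.2.1 r1.2.2.2 ad r1.2.1 hI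
    rw [harith, harith2, ← hR] at key
    rw [hcons, List.foldl_cons, List.foldl_cons, hA]
    simp only at key ⊢
    rw [← hr1eta] at key
    exact key

lemma stepA_fresh (chars : List Char) (hole : Int) (res : Bool) (rep : Option (Int × Int))
    (ad : PySem.Dict Int PVInner) (h : ad.contains hole = false) (l : Int) :
    pvStepA chars hole (res, rep, ad) l
      = pvStepA chars hole (res, rep, ad.insert hole PySem.Dict.empty) l := by
  unfold pvStepA
  simp [h, PySem.Dict.contains_insert_self]

lemma hole_eq (chars : List Char) (n hole : Int) (h1 : 1 ≤ hole) (h2 : hole < n)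
    (res : Bool) (rep : Option (Int × Int)) (ad : PySem.Dict Int PVInner)
    (had : ad.contains hole = false) (hrep : rep = none → res = false) :
    pvHoleA chars n (res, rep, ad) hole
        = pvSweepHole chars (pvSnapsOf chars n) n (res, rep, ad) hole
    ∧ ((pvSweepHole chars (pvSnapsOf chars n) n (res, rep, ad) hole).2.1 = none
        → (pvSweepHole chars (pvSnapsOf chars n) n (res, rep, ad) hole).1 = false)
    ∧ ∀ h : Int, hole < h
        → (pvSweepHole chars (pvSnapsOf chars n) n (res, rep, ad) hole).2.2.contains h
            = ad.contains h := by
  have hm : 1 ≤ min hole (n - hole) := by omega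
  have hk : (1 : Int) + ((min hole (n - hole)).toNat : Int) = min hole (n - hole) + 1 := by omega
  have hnilR : pvCnt chars hole (hole + (1 - 1)) = PySem.Dict.empty :=
    pvCnt_empty chars hole (hole + (1 - 1)) (by omega)
  obtain ⟨hmain, hinv⟩ := inner_glue chars n hole (min hole (n - hole)).toNat 1 le_rfl
    (by rw [hk]) res rep ad PySem.Dict.empty hrep
  rw [hk, hnilR] at hmain hinv
  have hcons : PySem.List.pyRange 1 (min hole (n - hole) + 1) 1
      = 1 :: PySem.List.pyRange 2 (min hole (n - hole) + 1) 1 :=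
    PySem.List.pyRange_one_cons (by omega)
  have hfold :
      (PySem.List.pyRange 1 (min hole (n - hole) + 1) 1).foldl (pvStepA chars hole) (res, rep, ad)
        = (PySem.List.pyRange 1 (min hole (n - hole) + 1) 1).foldl (pvStepA chars hole)
            (res, rep, ad.insert hole PySem.Dict.empty) := by
    rw [hcons, List.foldl_cons, List.foldl_cons, stepA_fresh chars hole res rep ad had]
  refine ⟨?_, ?_, ?_⟩
  · show (PySem.List.pyRange 1 (min hole (n - hole) + 1) 1).foldl (pvStepA chars hole) (res, rep, ad) = _
    rw [hfold, hmain]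
    rfl
  · exact hinv
  · intro h hh
    show (ad.insert hole _).contains h = ad.contains h
    rw [PySem.Dict.contains_insert]
    have : (h == hole) = false := by simp; omega
    rw [this, Bool.false_or]

lemma outer_eq (chars : List Char) (n : Int) :
    ∀ (k : Nat) (a : Int), 1 ≤ a → a + k ≤ n →
    ∀ (res : Bool) (rep : Option (Int × Int)) (ad : PySem.Dict Int PVInner),
    (rep = none → res = false) → (∀ h : Int, a ≤ h → ad.contains h = false) →
    (PySem.List.pyRange a (a + k) 1).foldl (pvHoleA chars n) (res, rep, ad)
      = (PySem.List.pyRange a (a + k) 1).foldl (pvSweepHole chars (pvSnapsOf chars n) n)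
          (res, rep, ad) := by
  intro k
  induction k with
  | zero =>
    intro a ha han res rep ad hrep hcont
    rw [show a + ((0 : Nat) : Int) = a by omega, PySem.List.pyRange_one_eq_nil le_rfl]
    rfl
  | succ k ih =>
    intro a ha han res rep ad hrep hcont
    have hcons : PySem.List.pyRange a (a + ((k + 1 : Nat) : Int)) 1
        = a :: PySem.List.pyRange (a + 1) (a + ((k + 1 : Nat) : Int)) 1 :=
      PySem.List.pyRange_one_cons (by push_cast; omega)
    obtain ⟨hmain, hinv, hkeys⟩ := hole_eq chars n a ha (by push_cast at han; omega)
      res rep ad (hcont a le_rfl) hrep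
    set st' := pvSweepHole chars (pvSnapsOf chars n) n (res, rep, ad) a with hst'
    have harith : (a + 1) + (k : Int) = a + ((k + 1 : Nat) : Int) := by push_cast; ring
    have key := ih (a + 1) (by omega) (by push_cast at han ⊢; omega) st'.1 st'.2.1 st'.2.2 hinv
      (fun h hh => by rw [hkeys h (by omega)]; exact hcont h (by omega))
    rw [harith] at key
    rw [hcons, List.foldl_cons, List.foldl_cons, hmain]
    rw [show (st'.1, st'.2.1, st'.2.2) = st' from rfl] at key
    exact key

-- ===== VERDICT (by name: the statement is the Claim_ definition above) =====
theorem analyse_word_spec : Claim_equal_analyse_word := by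
  intro word _
  show analyse_word word = analyse_word_alt word
  simp only [analyse_word, analyse_word_alt]
  by_cases h : PySem.Str.len word ≤ 1
  · rw [PySem.List.pyRange_one_eq_nil h]
    rfl
  · have hk : (1 : Int) + ((PySem.Str.len word - 1).toNat : Int) = PySem.Str.len word := by
      simp only [PySem.Str.len_eq] at h ⊢
      omega
    have := outer_eq word.toList (PySem.Str.len word) (PySem.Str.len word - 1).toNat 1
      le_rfl (by rw [hk]) false none PySem.Dict.empty (fun _ => rfl)
      (fun h _ => PySem.Dict.contains_empty h)
    rw [hk] at this
    rw [this]
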